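-- pv_equiv track=rewrite | github.com/hjn5018/sparta_github | codekata_programmers/왼쪽_오른쪽.py | solution
-- ===== SOURCE A (Python) =====
-- def solution(str_list):
--     for i in range(len(str_list)):
--         if str_list[i] == 'l':
--             if i == 0:
--                 return [] # l이 오른쪽 끝에!
--             return str_list[:i] # 왼쪽 리스트
--
--         if str_list[i] == 'r':
--             if i == len(str_list):
--                 return [] # r이 오른쪽 끝에!
--             return str_list[i+1:] # 오른쪽 리스트
--     return [] # ud밖에 없어!
-- ===== SOURCE B (Python) =====
-- def solution(str_list):
--     # Single right-to-left pass with accumulators: scan from the end, remembering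
--     # what the answer would be for the suffix seen so far, instead of A's
--     # left-to-right scan that returns a slice at the first marker.
--     kind = 'u'       # 'u' = no marker seen yet (to the right), 'l' / 'r' = nearest marker kind
--     rev_seen = []    # all elements scanned so far, in right-to-left order
--     rev_pref = []    # when kind == 'l': elements left of that 'l', right-to-left order
--     r_len = 0        # when kind == 'r': how many elements lie right of that 'r'
--     for s in reversed(str_list):
--         if s == 'l':
--             kind, rev_pref = 'l', []
--         elif s == 'r':
--             kind, r_len = 'r', len(rev_seen)
--         elif kind == 'l':
--             rev_pref.append(s)
--         rev_seen.append(s)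
--     if kind == 'l':
--         return rev_pref[::-1]
--     if kind == 'r':
--         return rev_seen[:r_len][::-1]
--     return []
-- ===== Notes on version B (the rewrite author's own statement) =====
-- stated objective: alternative
-- what changed: Replaces A's left-to-right scan that returns a slice at the first marker by a single right-to-left pass maintaining accumulators (the would-be answer for every suffix seen so far), so the answer is assembled incrementally instead of cut out of the list.
import Mathlib
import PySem

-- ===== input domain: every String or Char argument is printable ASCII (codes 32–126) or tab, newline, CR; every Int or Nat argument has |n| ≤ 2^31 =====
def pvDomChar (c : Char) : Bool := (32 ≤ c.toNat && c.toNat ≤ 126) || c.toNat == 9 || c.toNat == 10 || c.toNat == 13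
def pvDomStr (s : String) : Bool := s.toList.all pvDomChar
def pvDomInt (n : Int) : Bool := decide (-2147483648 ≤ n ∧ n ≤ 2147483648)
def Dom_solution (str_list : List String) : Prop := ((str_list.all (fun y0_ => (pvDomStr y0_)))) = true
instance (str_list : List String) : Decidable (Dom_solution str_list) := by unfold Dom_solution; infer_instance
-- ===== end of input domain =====

-- B replaces A's left-to-right scan that returns a slice at the first marker by a single
-- right-to-left pass with accumulators that assemble the answer incrementally (alternative).

-- ===== PORT A =====
-- A's loop 'for i in range(len(str_list))': recursion over the index list.
-- str_list[i] is ported as getD i "" — every index produced by the range is < length, so it is exact.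
def solutionLoop (str_list : List String) : List Nat → List String
  | [] => []  -- loop fell through: return []
  | i :: rest =>
    if str_list.getD i "" = "l" then
      if i = 0 then [] else PySem.List.slice str_list none (some (i : Int))
    else if str_list.getD i "" = "r" then
      if i = str_list.length then [] else PySem.List.slice str_list (some ((i : Int) + 1)) none
    else solutionLoop str_list rest

def solution (str_list : List String) : List String :=
  solutionLoop str_list (List.range str_list.length)

-- ===== PORT B =====
-- state = (kind, rev_seen, rev_pref, r_len), exactly Source B's four loop variables;
-- list.append s → ++ [s]; 'for s in reversed(str_list)' → foldl over str_list.reverse.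
def solutionStep (st : String × List String × List String × Nat) (s : String) :
    String × List String × List String × Nat :=
  if s = "l" then ("l", st.2.1 ++ [s], [], st.2.2.2)
  else if s = "r" then ("r", st.2.1 ++ [s], st.2.2.1, st.2.1.length)
  else if st.1 = "l" then (st.1, st.2.1 ++ [s], st.2.2.1 ++ [s], st.2.2.2)
  else (st.1, st.2.1 ++ [s], st.2.2.1, st.2.2.2)

def solution_alt (str_list : List String) : List String :=
  let st := str_list.reverse.foldl solutionStep ("u", [], [], 0)
  -- rev_pref[::-1] and rev_seen[:r_len][::-1]: r_len is a Nat ≤ length, so take/reverse are exact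
  if st.1 = "l" then st.2.2.1.reverse
  else if st.1 = "r" then (st.2.1.take st.2.2.2).reverse
  else []

-- ===== PRECONDITION & SPEC =====
def Spec_solution (str_list : List String) (out : List String) : Prop := out = solution_alt str_list
instance (str_list : List String) (out : List String) : Decidable (Spec_solution str_list out) := by unfold Spec_solution; infer_instance

-- ===== CLAIM (what is proved, stated in full; the proofs are below) =====
def Claim_equal_solution : Prop := ∀ (str_list : List String), Dom_solution str_list → Spec_solution str_list (solution str_list)

-- ===== LEMMAS AND PROOFS =====

-- classification of a list by its first marker: none = no 'l'/'r';
-- some (true, v)  = first marker is 'l', v = the elements before it;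
-- some (false, v) = first marker is 'r', v = the elements after it.
def chr : List String → Option (Bool × List String)
  | [] => none
  | y :: ys =>
    if y = "l" then some (true, [])
    else if y = "r" then some (false, ys)
    else match chr ys with
      | some (true, v) => some (true, y :: v)
      | o => o

-- A's loop computes the classification's answer, with a marker-free prefix already scanned.
lemma keyA (xs : List String) : ∀ (pre : List String), "l" ∉ pre → "r" ∉ pre →
    solutionLoop (pre ++ xs) (List.range' pre.length xs.length) =
      match chr xs with
      | some (true, v) => pre ++ v
      | some (false, v) => v
      | none => [] := by
  induction xs with
  | nil => intro pre _ _; simp [chr, solutionLoop]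
  | cons x xs ih =>
      intro pre hl hr
      have hget : (pre ++ x :: xs).getD pre.length "" = x := by
        simp [List.getD_eq_getElem?_getD]
      have hlen : pre.length ≠ (pre ++ x :: xs).length := by simp
      rw [List.length_cons, List.range'_succ, solutionLoop, hget]
      by_cases hxl : x = "l"
      · subst hxl
        have htake : PySem.List.slice (pre ++ "l" :: xs) none (some (pre.length : Int)) = pre := by
          rw [PySem.List.slice_to _ (by positivity)]
          simp [List.take_left']
        by_cases h0 : pre.length = 0
        · simp [chr, List.eq_nil_of_length_eq_zero h0]
        · simp [chr, h0, htake]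
      · by_cases hxr : x = "r"
        · subst hxr
          have hdrop : PySem.List.slice (pre ++ "r" :: xs) (some ((pre.length : Int) + 1)) none = xs := by
            rw [PySem.List.slice_from _ (by positivity)]
            have h1 : ((pre.length : Int) + 1).toNat = (pre ++ ["r"]).length := by simp
            rw [h1, show pre ++ "r" :: xs = (pre ++ ["r"]) ++ xs by simp, List.drop_left]
          rw [if_neg (by decide : ¬ ("r" : String) = "l"), if_pos rfl, if_neg hlen, hdrop]
          simp [chr]
        · rw [if_neg (by simpa using hxl), if_neg (by simpa using hxr)]
          have hsplit : pre ++ x :: xs = (pre ++ [x]) ++ xs := by simp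
          rw [hsplit, show pre.length + 1 = (pre ++ [x]).length by simp]
          rw [ih (pre ++ [x])
            (by intro hm; rcases List.mem_append.1 hm with h | h
                · exact hl h
                · simp at h; exact hxl h.symm)
            (by intro hm; rcases List.mem_append.1 hm with h | h
                · exact hr h
                · simp at h; exact hxr h.symm)]
          simp only [chr, if_neg hxl, if_neg hxr]
          cases hc : chr xs with
          | none => simp
          | some p =>
              rcases p with ⟨b, v⟩
              cases b <;> simp

-- unfolding B's fold by the leftmost element
lemma fold_cons (x : String) (xs : List String) :
    (x :: xs).reverse.foldl solutionStep ("u", [], [], 0) =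
    solutionStep (xs.reverse.foldl solutionStep ("u", [], [], 0)) x := by
  rw [List.reverse_cons, List.foldl_append]; rfl

-- invariant of B's right-to-left fold, stated through the same classification
lemma keyB (xs : List String) :
    (xs.reverse.foldl solutionStep ("u", [], [], 0)).2.1 = xs.reverse ∧
    (match chr xs with
     | none => (xs.reverse.foldl solutionStep ("u", [], [], 0)).1 = "u"
     | some (true, v) =>
        (xs.reverse.foldl solutionStep ("u", [], [], 0)).1 = "l" ∧
        (xs.reverse.foldl solutionStep ("u", [], [], 0)).2.2.1.reverse = v
     | some (false, v) =>
        (xs.reverse.foldl solutionStep ("u", [], [], 0)).1 = "r" ∧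
        (xs.reverse.foldl solutionStep ("u", [], [], 0)).2.2.2
          ≤ (xs.reverse.foldl solutionStep ("u", [], [], 0)).2.1.length ∧
        ((xs.reverse.foldl solutionStep ("u", [], [], 0)).2.1.take
          (xs.reverse.foldl solutionStep ("u", [], [], 0)).2.2.2).reverse = v) := by
  induction xs with
  | nil => exact ⟨rfl, rfl⟩
  | cons x xs ih =>
      obtain ⟨hseen, hrest⟩ := ih
      rw [fold_cons]
      set st := xs.reverse.foldl solutionStep ("u", [], [], 0) with hst
      by_cases hxl : x = "l"
      · subst hxl
        refine ⟨by simp [solutionStep, hseen], ?_⟩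
        simp [chr, solutionStep]
      · by_cases hxr : x = "r"
        · subst hxr
          refine ⟨by simp [solutionStep, hseen], ?_⟩
          simp only [chr, if_neg (by decide : ¬ ("r" : String) = "l")]
          refine ⟨by simp [solutionStep], ?_, ?_⟩
          · simp [solutionStep]
          · simp [solutionStep, hseen]
        · have hstep : solutionStep st x =
              (if st.1 = "l" then (st.1, st.2.1 ++ [x], st.2.2.1 ++ [x], st.2.2.2)
               else (st.1, st.2.1 ++ [x], st.2.2.1, st.2.2.2)) := by
            simp [solutionStep, hxl, hxr]
          constructor
          · rw [hstep]; split_ifs <;> simp [hseen]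
          · simp only [chr, if_neg hxl, if_neg hxr]
            cases hc : chr xs with
            | none =>
                rw [hc] at hrest
                rw [hstep, if_neg (by rw [hrest]; decide)]
                simpa using hrest
            | some p =>
                rcases p with ⟨b, v⟩
                cases b with
                | true =>
                    rw [hc] at hrest
                    obtain ⟨hk, hv⟩ := hrest
                    rw [hstep, if_pos hk]
                    exact ⟨hk, by simp [hv]⟩
                | false =>
                    rw [hc] at hrest
                    obtain ⟨hk, hle, hv⟩ := hrest
                    rw [hstep, if_neg (by rw [hk]; decide)]
                    exact ⟨hk, by simpa using Nat.le_succ_of_le hle,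
                      by rwa [List.take_append_of_le_length hle]⟩

-- ===== VERDICT (by name: the statement is the Claim_ definition above) =====
theorem solution_spec : Claim_equal_solution := by
  intro str_list _
  unfold Spec_solution solution solution_alt
  rw [List.range_eq_range']
  have hA := keyA str_list [] (by simp) (by simp)
  simp only [List.nil_append, List.length_nil] at hA
  have hB := keyB str_list
  set st := str_list.reverse.foldl solutionStep ("u", [], [], 0) with hst
  obtain ⟨_, hrest⟩ := hB
  cases hc : chr str_list with
  | none =>
      rw [hc] at hrest hA
      simp only [hA]
      rw [if_neg (by rw [hrest]; decide), if_neg (by rw [hrest]; decide)]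
  | some p =>
      rcases p with ⟨b, v⟩
      cases b with
      | true =>
          rw [hc] at hrest hA
          obtain ⟨hk, hv⟩ := hrest
          simp only [hA]
          rw [if_pos hk, hv]
      | false =>
          rw [hc] at hrest hA
          obtain ⟨hk, _, hv⟩ := hrest
          simp only [hA]
          rw [if_neg (by rw [hk]; decide), if_pos hk, hv]
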